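-- pv_equiv track=rewrite | github.com/jerrypm/passive-income-executor | scripts/content-machine/publish_newsletter.py | extract_teaser
-- ===== SOURCE A (Python) =====
-- def extract_teaser(content, max_length=280):
--     """Extract a teaser from the newsletter content for social posting.
--
--     Looks for the first substantial paragraph after the title.
--     """
--     lines = content.split("\n")
--     in_frontmatter = False
--     paragraphs = []
--     current = []
--
--     for line in lines:
--         stripped = line.strip()
--
--         # Skip title and metadata
--         if stripped.startswith("# ") or stripped.startswith("*Issue"):
--             continue
--         if stripped == "---":
--             continue
--         if stripped.startswith("```"):
--             in_frontmatter = not in_frontmatter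
--             continue
--         if in_frontmatter:
--             continue
--
--         # Skip headers, tables, empty lines
--         if stripped.startswith("#") or stripped.startswith("|"):
--             if current:
--                 paragraphs.append(" ".join(current))
--                 current = []
--             continue
--
--         if stripped:
--             current.append(stripped)
--         else:
--             if current:
--                 paragraphs.append(" ".join(current))
--                 current = []
--
--     if current:
--         paragraphs.append(" ".join(current))
--
--     # Find a good paragraph for teaser (not too short)
--     for p in paragraphs:
--         # Skip very short lines or formatting artifacts
--         if len(p) > 50 and not p.startswith("```") and not p.startswith("|"):
--             if len(p) <= max_length:
--                 return p
--             return p[:max_length - 3] + "..."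
--
--     return "New newsletter issue just dropped!"
-- ===== SOURCE B (Python) =====
-- def extract_teaser(content, max_length=280):
--     """Extract a teaser from the newsletter content for social posting.
--
--     Single fused pass: whenever a paragraph is finalized, test it and
--     return immediately; no intermediate paragraphs list, no second loop.
--     """
--     def finish(current):
--         p = " ".join(current)
--         if len(p) > 50 and not p.startswith("```") and not p.startswith("|"):
--             if len(p) <= max_length:
--                 return p
--             return p[:max_length - 3] + "..."
--         return None
--
--     in_frontmatter = False
--     current = []
--
--     for line in content.split("\n"):
--         stripped = line.strip()
--
--         if stripped.startswith("# ") or stripped.startswith("*Issue"):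
--             continue
--         if stripped == "---":
--             continue
--         if stripped.startswith("```"):
--             in_frontmatter = not in_frontmatter
--             continue
--         if in_frontmatter:
--             continue
--
--         if stripped.startswith("#") or stripped.startswith("|"):
--             if current:
--                 teaser = finish(current)
--                 if teaser is not None:
--                     return teaser
--                 current = []
--             continue
--
--         if stripped:
--             current.append(stripped)
--         else:
--             if current:
--                 teaser = finish(current)
--                 if teaser is not None:
--                     return teaser
--                 current = []
--
--     if current:
--         teaser = finish(current)
--         if teaser is not None:
--             return teaser
--
--     return "New newsletter issue just dropped!"
-- ===== Notes on version B (the rewrite author's own statement) =====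
-- stated objective: alternative
-- what changed: Fused A's two phases (collect all paragraphs into a list, then scan that list for the first qualifying one) into a single pass that tests each paragraph the moment it is finalized and returns early, eliminating the paragraphs list and the second loop.
import Mathlib
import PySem

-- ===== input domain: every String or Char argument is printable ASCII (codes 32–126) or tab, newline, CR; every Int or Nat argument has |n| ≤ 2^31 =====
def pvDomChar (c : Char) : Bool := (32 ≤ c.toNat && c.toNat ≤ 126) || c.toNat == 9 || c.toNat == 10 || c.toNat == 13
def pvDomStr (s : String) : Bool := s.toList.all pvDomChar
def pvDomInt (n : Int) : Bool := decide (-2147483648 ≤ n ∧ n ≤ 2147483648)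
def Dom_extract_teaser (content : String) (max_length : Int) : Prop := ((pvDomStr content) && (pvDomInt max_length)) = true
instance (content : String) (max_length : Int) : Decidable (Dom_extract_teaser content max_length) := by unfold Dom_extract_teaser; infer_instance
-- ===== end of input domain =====

-- B fuses A's two phases (collect a paragraphs list, then scan it) into one early-returning pass; same return value, alternative decomposition.


-- ===== PORT A =====
-- A, phase 1: fold over the lines, state (in_frontmatter, paragraphs, current).
def teaserStep (st : Bool × List String × List String) (line : String) :
    Bool × List String × List String :=
  let stripped := PySem.Str.strip line
  if PySem.Str.startswith stripped "# " || PySem.Str.startswith stripped "*Issue" then st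
  else if stripped = "---" then st
  else if PySem.Str.startswith stripped "```" then (!st.1, st.2.1, st.2.2)
  else if st.1 then st
  else if PySem.Str.startswith stripped "#" || PySem.Str.startswith stripped "|" then
    if st.2.2 ≠ [] then (st.1, st.2.1 ++ [PySem.Str.join " " st.2.2], [])
    else st
  else if stripped ≠ "" then (st.1, st.2.1, st.2.2 ++ [stripped])
  else if st.2.2 ≠ [] then (st.1, st.2.1 ++ [PySem.Str.join " " st.2.2], [])
  else st

-- A, phase 2: the 'for p in paragraphs' selection loop with its early returns.
def teaserPick (max_length : Int) : List String → String
  | [] => "New newsletter issue just dropped!"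
  | p :: rest =>
    if PySem.Str.len p > 50 && !PySem.Str.startswith p "```" && !PySem.Str.startswith p "|" then
      if PySem.Str.len p ≤ max_length then p
      else PySem.Str.slice p none (some (max_length - 3)) ++ "..."
    else teaserPick max_length rest

def extract_teaser (content : String) (max_length : Int) : String :=
  -- content.split("\n"): sep ≠ "", so PySem.Str.split? is always `some`; .getD [] is exact
  let lines := (PySem.Str.split? content "\n").getD []
  let st := List.foldl teaserStep (false, [], []) lines
  let paragraphs := if st.2.2 ≠ [] then st.2.1 ++ [PySem.Str.join " " st.2.2] else st.2.1
  teaserPick max_length paragraphs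

-- ===== PORT B =====
-- B's inner helper finish(current): test the finalized paragraph right away.
def teaserFinish (max_length : Int) (current : List String) : Option String :=
  let p := PySem.Str.join " " current
  if PySem.Str.len p > 50 && !PySem.Str.startswith p "```" && !PySem.Str.startswith p "|" then
    if PySem.Str.len p ≤ max_length then some p
    else some (PySem.Str.slice p none (some (max_length - 3)) ++ "...")
  else none

-- B's single fused loop: no paragraphs list; early return at every paragraph boundary.
def teaserLoop (max_length : Int) : List String → Bool → List String → String
  | [], _, current =>
    (if current ≠ [] then teaserFinish max_length current else none).getD
      "New newsletter issue just dropped!"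
  | line :: rest, in_frontmatter, current =>
    let stripped := PySem.Str.strip line
    if PySem.Str.startswith stripped "# " || PySem.Str.startswith stripped "*Issue" then
      teaserLoop max_length rest in_frontmatter current
    else if stripped = "---" then teaserLoop max_length rest in_frontmatter current
    else if PySem.Str.startswith stripped "```" then
      teaserLoop max_length rest (!in_frontmatter) current
    else if in_frontmatter then teaserLoop max_length rest in_frontmatter current
    else if PySem.Str.startswith stripped "#" || PySem.Str.startswith stripped "|" then
      if current ≠ [] then
        match teaserFinish max_length current with
        | some t => t
        | none => teaserLoop max_length rest in_frontmatter []
      else teaserLoop max_length rest in_frontmatter current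
    else if stripped ≠ "" then teaserLoop max_length rest in_frontmatter (current ++ [stripped])
    else if current ≠ [] then
      match teaserFinish max_length current with
      | some t => t
      | none => teaserLoop max_length rest in_frontmatter []
    else teaserLoop max_length rest in_frontmatter current

def extract_teaser_alt (content : String) (max_length : Int) : String :=
  teaserLoop max_length ((PySem.Str.split? content "\n").getD []) false []

-- ===== PRECONDITION & SPEC =====
def Spec_extract_teaser (content : String) (max_length : Int) (out : String) : Prop := out = extract_teaser_alt content max_length
instance (content : String) (max_length : Int) (out : String) : Decidable (Spec_extract_teaser content max_length out) := by unfold Spec_extract_teaser; infer_instance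

-- ===== CLAIM (what is proved, stated in full; the proofs are below) =====
def Claim_equal_extract_teaser : Prop := ∀ (content : String) (max_length : Int), Dom_extract_teaser content max_length → Spec_extract_teaser content max_length (extract_teaser content max_length)

-- ===== LEMMAS AND PROOFS =====

-- the paragraphs A's fold accumulates do not depend on the already-collected prefix
theorem teaserFold_ps (lines : List String) (fm : Bool) (cur ps : List String) :
    List.foldl teaserStep (fm, ps, cur) lines =
      ((List.foldl teaserStep (fm, [], cur) lines).1,
       ps ++ (List.foldl teaserStep (fm, [], cur) lines).2.1,
       (List.foldl teaserStep (fm, [], cur) lines).2.2) := by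
  induction lines generalizing fm cur ps with
  | nil => simp
  | cons l rest ih =>
    simp only [List.foldl_cons]
    rw [show teaserStep (fm, ps, cur) l =
        ((teaserStep (fm, [], cur) l).1, ps ++ (teaserStep (fm, [], cur) l).2.1,
         (teaserStep (fm, [], cur) l).2.2) from by
      simp only [teaserStep]; split_ifs <;> simp]
    rw [ih, ih _ _ (teaserStep (fm, [], cur) l).2.1]
    simp

-- the paragraph list A finalizes when started from an intermediate state (fm, [], cur)
def teaserParas (lines : List String) (fm : Bool) (cur : List String) : List String :=
  let st := List.foldl teaserStep (fm, [], cur) lines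
  if st.2.2 ≠ [] then st.2.1 ++ [PySem.Str.join " " st.2.2] else st.2.1

theorem teaserLoop_eq_pick (max_length : Int) (lines : List String) (fm : Bool)
    (cur : List String) :
    teaserLoop max_length lines fm cur = teaserPick max_length (teaserParas lines fm cur) := by
  induction lines generalizing fm cur with
  | nil =>
    simp only [teaserLoop, teaserParas, List.foldl_nil]
    by_cases hc : cur = []
    · simp [hc, teaserPick]
    · simp only [hc, ne_eq, not_false_eq_true, if_pos, List.nil_append]
      simp only [teaserFinish, teaserPick]
      split_ifs <;> rfl
  | cons l rest ih =>
    have hpar : ∀ fm' cur', teaserStep (fm, [], cur) l = (fm', [], cur') →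
        teaserParas (l :: rest) fm cur = teaserParas rest fm' cur' := by
      intro fm' cur' h
      simp only [teaserParas, List.foldl_cons, h]
    have hflush : ∀ fm', teaserStep (fm, [], cur) l = (fm', [PySem.Str.join " " cur], []) →
        teaserParas (l :: rest) fm cur =
          PySem.Str.join " " cur :: teaserParas rest fm' [] := by
      intro fm' h
      simp only [teaserParas, List.foldl_cons, h,
        teaserFold_ps rest fm' [] [PySem.Str.join " " cur]]
      split_ifs <;> simp
    simp only [teaserLoop]
    split_ifs with h1 h2 h3 h4 h5 h6 h7 h8
    · rw [ih, ← hpar fm cur (by simp only [teaserStep]; rw [if_pos h1])]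
    · rw [ih, ← hpar fm cur (by simp only [teaserStep]; rw [if_neg h1, if_pos h2])]
    · rw [ih, ← hpar (!fm) cur (by simp only [teaserStep]; rw [if_neg h1, if_neg h2, if_pos h3])]
    · rw [ih, ← hpar fm cur (by
        simp only [teaserStep]; rw [if_neg h1, if_neg h2, if_neg h3, if_pos h4])]
    · rw [hflush fm (by
        simp only [teaserStep]
        rw [if_neg h1, if_neg h2, if_neg h3, if_neg h4, if_pos h5, if_pos h6]; simp)]
      simp only [teaserFinish, teaserPick]
      split_ifs <;> first | rfl | exact ih _ _
    · rw [ih, ← hpar fm cur (by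
        simp only [teaserStep]
        rw [if_neg h1, if_neg h2, if_neg h3, if_neg h4, if_pos h5, if_neg h6])]
    · rw [ih, ← hpar fm (cur ++ [PySem.Str.strip l]) (by
        simp only [teaserStep]
        rw [if_neg h1, if_neg h2, if_neg h3, if_neg h4, if_neg h5, if_pos h7])]
    · rw [hflush fm (by
        simp only [teaserStep]
        rw [if_neg h1, if_neg h2, if_neg h3, if_neg h4, if_neg h5, if_neg h7, if_pos h8]; simp)]
      simp only [teaserFinish, teaserPick]
      split_ifs <;> first | rfl | exact ih _ _
    · rw [ih, ← hpar fm cur (by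
        simp only [teaserStep]
        rw [if_neg h1, if_neg h2, if_neg h3, if_neg h4, if_neg h5, if_neg h7, if_neg h8])]

-- ===== VERDICT (by name: the statement is the Claim_ definition above) =====
theorem extract_teaser_spec : Claim_equal_extract_teaser := by
  intro content max_length _
  unfold Spec_extract_teaser extract_teaser extract_teaser_alt
  rw [teaserLoop_eq_pick]
  rfl
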